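-- pv_equiv track=rewrite | github.com/MinhCreator/python_dev | source-code/HSG_exam/đề-thi/đề thi hsg tỉnh quảng bình 2022-2023/SUMOFNEG.py | find_max_len_sum_of_negatives
-- ===== SOURCE A (Python) =====
-- def find_max_len_sum_of_negatives(num , lst):
--
--     """
--     _function_
--
--     input: num is integer, lst is list
--
--     Returns:
--         _type_: _int_
--     """
--     # variable
--     prefix_sum = [0]
--     start = -1
--     maxt = 0
--
--     # another proccess
--     for tmp in lst:
--          prefix_sum.append(prefix_sum[-1] + tmp)
--
--     # main proccess
--     for index in range(num):
--
--         for jndex in range(index + 1, num + 1):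
--
--             if prefix_sum[jndex] - prefix_sum[index] < 0 and jndex - index > maxt:
--                     start = index
--                     maxt = jndex - index
--
--     store_lst = lst[start: start + maxt]
--
--
--     return len(store_lst)
-- ===== SOURCE B (Python) =====
-- def find_max_len_sum_of_negatives(num, lst):
--     # prefix sums of the first num elements
--     P = [0]
--     s = 0
--     for x in lst[:max(num, 0)]:
--         s += x
--         P.append(s)
--     # try window lengths from largest to smallest; return the first that admits
--     # a negative-sum window
--     for L in range(num, 0, -1):
--         if any(P[i + L] - P[i] < 0 for i in range(num - L + 1)):
--             return L
--     return 0
-- ===== Notes on version B (the rewrite author's own statement) =====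
-- stated objective: alternative
-- what changed: Instead of maximizing over all O(n^2) index pairs while tracking a start index and slicing at the end, B builds the prefix sums once and scans candidate window lengths from num downward, returning at the first length for which some window has negative sum (early exit, no start tracking, no final slice).
import Mathlib
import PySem

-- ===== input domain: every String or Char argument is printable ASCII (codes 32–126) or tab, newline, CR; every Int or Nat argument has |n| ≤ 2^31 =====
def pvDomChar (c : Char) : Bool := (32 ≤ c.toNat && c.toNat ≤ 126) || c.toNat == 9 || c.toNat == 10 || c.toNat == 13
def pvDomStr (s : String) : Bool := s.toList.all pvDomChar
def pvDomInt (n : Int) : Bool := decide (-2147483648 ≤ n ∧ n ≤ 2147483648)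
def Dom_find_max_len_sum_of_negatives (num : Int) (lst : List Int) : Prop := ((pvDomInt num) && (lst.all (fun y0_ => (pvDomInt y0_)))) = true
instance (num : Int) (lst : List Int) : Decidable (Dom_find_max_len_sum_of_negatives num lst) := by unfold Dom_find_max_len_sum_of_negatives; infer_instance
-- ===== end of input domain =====

-- B replaces A's maximize-over-all-pairs-then-slice scheme by: build the prefix sums once,
-- then scan candidate window lengths from num downward and return the first length that
-- admits a negative-sum window (no start tracking, no final slice).

-- ===== PORT A =====
def find_max_len_sum_of_negatives (num : Int) (lst : List Int) : Int :=
  let prefix_sum : List Int :=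
    lst.foldl (fun ps tmp => ps ++ [PySem.List.pyGetD ps (-1) 0 + tmp]) [0]
  let sm : Int × Int :=
    (PySem.List.pyRange 0 num 1).foldl (fun s index =>
      (PySem.List.pyRange (index + 1) (num + 1) 1).foldl (fun s jndex =>
        if PySem.List.pyGetD prefix_sum jndex 0 - PySem.List.pyGetD prefix_sum index 0 < 0
            ∧ jndex - index > s.2
        then (index, jndex - index) else s) s) (-1, 0)
  let store_lst := PySem.List.slice lst (some sm.1) (some (sm.1 + sm.2))
  (store_lst.length : Int)

-- ===== PORT B =====
def find_max_len_sum_of_negatives_alt (num : Int) (lst : List Int) : Int :=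
  let P : List Int :=
    ((PySem.List.slice lst none (some (max num 0))).foldl
      (fun (st : List Int × Int) x => (st.1 ++ [st.2 + x], st.2 + x)) ([0], 0)).1
  match (PySem.List.pyRange num 0 (-1)).find? (fun L =>
      (PySem.List.pyRange 0 (num - L + 1) 1).any (fun i =>
        decide (PySem.List.pyGetD P (i + L) 0 - PySem.List.pyGetD P i 0 < 0))) with
  | some L => L
  | none => 0

-- ===== PRECONDITION & SPEC =====
-- Pre_ excludes exactly the inputs where A raises IndexError: num > len(lst)
-- (A's prefix_sum has len(lst)+1 entries and A indexes it up to num).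
def Pre_find_max_len_sum_of_negatives (num : Int) (lst : List Int) : Prop :=
  num ≤ (lst.length : Int)
instance (num : Int) (lst : List Int) : Decidable (Pre_find_max_len_sum_of_negatives num lst) := by
  unfold Pre_find_max_len_sum_of_negatives; infer_instance
def pvWitness_find_max_len_sum_of_negatives : Int × List Int := (2, [1, -3])

def Spec_find_max_len_sum_of_negatives (num : Int) (lst : List Int) (out : Int) : Prop := out = find_max_len_sum_of_negatives_alt num lst
instance (num : Int) (lst : List Int) (out : Int) : Decidable (Spec_find_max_len_sum_of_negatives num lst out) := by unfold Spec_find_max_len_sum_of_negatives; infer_instance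

-- ===== CLAIM (what is proved, stated in full; the proofs are below) =====
def Claim_equal_find_max_len_sum_of_negatives : Prop := ∀ (num : Int) (lst : List Int), Dom_find_max_len_sum_of_negatives num lst → Pre_find_max_len_sum_of_negatives num lst → Spec_find_max_len_sum_of_negatives num lst (find_max_len_sum_of_negatives num lst)

-- ===== LEMMAS AND PROOFS =====

-- A's prefix-sum loop: from any nonempty accumulator it appends the running partial sums.
theorem pvScanA (l : List Int) : ∀ (acc : List Int) (h : acc ≠ []),
    l.foldl (fun ps tmp => ps ++ [PySem.List.pyGetD ps (-1) 0 + tmp]) acc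
      = acc ++ (List.range l.length).map (fun k => acc.getLast h + (l.take (k + 1)).sum) := by
  induction l with
  | nil => intro acc h; simp
  | cons x xs ih =>
    intro acc h
    simp only [List.foldl_cons]
    rw [PySem.List.pyGetD_neg_one (h := h)]
    rw [ih (acc ++ [acc.getLast h + x]) (by simp)]
    rw [List.getLast_append_singleton]
    simp only [List.length_cons, List.range_succ_eq_map, List.map_cons, List.map_map]
    simp [List.append_assoc, Function.comp, add_assoc]

-- A's prefix_sum is the table of partial sums of lst.
theorem pvPrefixA (lst : List Int) :
    lst.foldl (fun ps tmp => ps ++ [PySem.List.pyGetD ps (-1) 0 + tmp]) [0]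
      = (List.range (lst.length + 1)).map (fun k => (lst.take k).sum) := by
  rw [pvScanA lst [0] (by simp)]
  simp [List.range_succ_eq_map, Function.comp]

-- B's prefix-sum loop (table paired with the running sum).
theorem pvScanB (l : List Int) : ∀ (acc : List Int) (c : Int),
    l.foldl (fun (st : List Int × Int) x => (st.1 ++ [st.2 + x], st.2 + x)) (acc, c)
      = (acc ++ (List.range l.length).map (fun k => c + (l.take (k + 1)).sum), c + l.sum) := by
  induction l with
  | nil => intro acc c; simp
  | cons x xs ih =>
    intro acc c
    simp only [List.foldl_cons]
    rw [ih (acc ++ [c + x]) (c + x)]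
    simp only [List.length_cons, List.range_succ_eq_map, List.map_cons, List.map_map]
    simp [List.append_assoc, Function.comp, add_assoc]

-- B's P is the table of partial sums of lst.take num.toNat.
theorem pvPrefixB (num : Int) (lst : List Int) :
    (((PySem.List.slice lst none (some (max num 0))).foldl
      (fun (st : List Int × Int) x => (st.1 ++ [st.2 + x], st.2 + x)) ([0], 0)).1)
      = (List.range ((lst.take num.toNat).length + 1)).map (fun k => ((lst.take num.toNat).take k).sum) := by
  rw [PySem.List.slice_to lst (by omega)]
  have : (max num 0).toNat = num.toNat := by omega
  rw [this, pvScanB]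
  simp [List.range_succ_eq_map, Function.comp]

-- Reading the table at an in-range index gives the partial sum.
theorem pvTableGet (lst : List Int) (j : Int) (h0 : 0 ≤ j) (h1 : j ≤ (lst.length : Int)) :
    PySem.List.pyGetD ((List.range (lst.length + 1)).map (fun k => (lst.take k).sum)) j 0
      = (lst.take j.toNat).sum := by
  rw [PySem.List.pyGetD_eq_getElem _ 0 h0 (by simp; omega)]
  simp

-- Partial sums of a prefix agree with partial sums of the whole list.
theorem pvF_take (num : Int) (lst : List Int) (k : Nat) (hk : (k : Int) ≤ num) :
    ((lst.take num.toNat).take k).sum = (lst.take k).sum := by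
  rw [List.take_take, min_eq_left (by omega)]

-- A's inner loop: the running (start, width) state grows, any change comes from a
-- satisfying j, and every satisfying j is dominated by the final width.
theorem pvInner (C : Int → Prop) [DecidablePred C] (i : Int) :
    ∀ (js : List Int) (s : Int × Int),
    s.2 ≤ (js.foldl (fun s j => if C j ∧ j - i > s.2 then (i, j - i) else s) s).2 ∧
    ((js.foldl (fun s j => if C j ∧ j - i > s.2 then (i, j - i) else s) s) = s ∨
      ∃ j ∈ js, C j ∧ (js.foldl (fun s j => if C j ∧ j - i > s.2 then (i, j - i) else s) s) = (i, j - i)) ∧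
    (∀ j ∈ js, C j → j - i ≤ (js.foldl (fun s j => if C j ∧ j - i > s.2 then (i, j - i) else s) s).2) := by
  intro js
  induction js with
  | nil => intro s; simp
  | cons j js ih =>
    intro s
    simp only [List.foldl_cons]
    by_cases h : C j ∧ j - i > s.2
    · rw [if_pos h]
      obtain ⟨m, cases, bound⟩ := ih (i, j - i)
      refine ⟨by simp at m ⊢; omega, ?_, ?_⟩
      · rcases cases with heq | ⟨j', hj', hc, heq⟩
        · exact Or.inr ⟨j, by simp, h.1, heq⟩
        · exact Or.inr ⟨j', by simp [hj'], hc, heq⟩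
      · intro j' hj' hc
        rcases List.mem_cons.mp hj' with rfl | hmem
        · simpa using m
        · exact bound j' hmem hc
    · rw [if_neg h]
      obtain ⟨m, cases, bound⟩ := ih s
      refine ⟨m, ?_, ?_⟩
      · rcases cases with heq | ⟨j', hj', hc, heq⟩
        · exact Or.inl heq
        · exact Or.inr ⟨j', by simp [hj'], hc, heq⟩
      · intro j' hj' hc
        rcases List.mem_cons.mp hj' with rfl | hmem
        · push Not at h; have := h hc; omega
        · exact bound j' hmem hc

-- A's outer loop: the final state is either untouched or records a valid pair, and it
-- dominates the width of every valid pair.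
theorem pvOuter (C : Int → Int → Prop) [inst : ∀ i j, Decidable (C i j)] (num : Int) :
    ∀ (is_ : List Int) (s : Int × Int),
    s.2 ≤ (is_.foldl (fun s index =>
      (PySem.List.pyRange (index + 1) (num + 1) 1).foldl (fun s jndex =>
        if C index jndex ∧ jndex - index > s.2 then (index, jndex - index) else s) s) s).2 ∧
    ((is_.foldl (fun s index =>
      (PySem.List.pyRange (index + 1) (num + 1) 1).foldl (fun s jndex =>
        if C index jndex ∧ jndex - index > s.2 then (index, jndex - index) else s) s) s) = s ∨
      ∃ i ∈ is_, ∃ j, i < j ∧ j ≤ num ∧ C i j ∧ (is_.foldl (fun s index =>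
      (PySem.List.pyRange (index + 1) (num + 1) 1).foldl (fun s jndex =>
        if C index jndex ∧ jndex - index > s.2 then (index, jndex - index) else s) s) s) = (i, j - i)) ∧
    (∀ i ∈ is_, ∀ j, i < j → j ≤ num → C i j → j - i ≤ (is_.foldl (fun s index =>
      (PySem.List.pyRange (index + 1) (num + 1) 1).foldl (fun s jndex =>
        if C index jndex ∧ jndex - index > s.2 then (index, jndex - index) else s) s) s).2) := by
  intro is_
  induction is_ with
  | nil => intro s; simp
  | cons i is ih =>
    intro s
    simp only [List.foldl_cons]
    obtain ⟨im, icases, ibound⟩ := pvInner (fun j => C i j) i (PySem.List.pyRange (i + 1) (num + 1) 1) s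
    set s' := (PySem.List.pyRange (i + 1) (num + 1) 1).foldl
      (fun s jndex => if C i jndex ∧ jndex - i > s.2 then (i, jndex - i) else s) s with hs'
    obtain ⟨om, ocases, obound⟩ := ih s'
    refine ⟨le_trans im om, ?_, ?_⟩
    · rcases ocases with heq | ⟨i', hi', j', hlt, hle, hc, heq⟩
      · rcases icases with heq2 | ⟨j, hj, hc, heq2⟩
        · exact Or.inl (heq.trans heq2)
        · obtain ⟨h1, h2⟩ := PySem.List.mem_pyRange_one.mp hj
          exact Or.inr ⟨i, by simp, j, by omega, by omega, hc, heq.trans heq2⟩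
      · exact Or.inr ⟨i', by simp [hi'], j', hlt, hle, hc, heq⟩
    · intro i' hi' j hlt hle hc
      rcases List.mem_cons.mp hi' with rfl | hmem
      · exact le_trans (ibound j (PySem.List.mem_pyRange_one.mpr ⟨by omega, by omega⟩) hc) om
      · exact obound i' hmem j hlt hle hc

theorem pvMemCountdown {x num : Int} (h : x ∈ PySem.List.pyRange num 0 (-1)) :
    1 ≤ x ∧ x ≤ num := by
  rw [PySem.List.pyRange_neg_one] at h
  simp only [List.mem_map, List.mem_range] at h
  obtain ⟨k, hk, rfl⟩ := h
  omega

theorem pvFindNone (num : Int) (p : Int → Bool) (h : ∀ L, 1 ≤ L → L ≤ num → p L = false) :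
    (PySem.List.pyRange num 0 (-1)).find? p = none := by
  rw [List.find?_eq_none]
  intro x hx
  obtain ⟨h1, h2⟩ := pvMemCountdown hx
  simp [h x h1 h2]

-- find? over range(num, 0, -1) returns w when w holds and everything above it fails.
theorem pvFindSome (num w : Int) (p : Int → Bool) (h1 : 1 ≤ w) (h2 : w ≤ num)
    (hw : p w = true) (hab : ∀ L, w < L → L ≤ num → p L = false) :
    (PySem.List.pyRange num 0 (-1)).find? p = some w := by
  induction hn : (num - w).toNat generalizing num with
  | zero =>
    have : num = w := by omega
    subst this
    rw [PySem.List.pyRange_neg_one_cons (by omega)]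
    simp [List.find?, hw]
  | succ n ih =>
    rw [PySem.List.pyRange_neg_one_cons (by omega)]
    rw [List.find?_cons_of_neg]
    · exact ih (num - 1) (by omega) (fun L hL1 hL2 => hab L hL1 (by omega)) (by omega)
    · simp [hab num (by omega) le_rfl]

theorem pvMain (num : Int) (lst : List Int) (hpre : num ≤ (lst.length : Int)) :
    find_max_len_sum_of_negatives num lst = find_max_len_sum_of_negatives_alt num lst := by
  unfold find_max_len_sum_of_negatives find_max_len_sum_of_negatives_alt
  simp only []
  rw [pvPrefixA lst, pvPrefixB num lst]
  set F : Nat → Int := fun k => (lst.take k).sum with hF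
  set lst' := lst.take num.toNat with hlst'
  have hlen' : (lst'.length : Int) = max num 0 := by
    simp [hlst']; omega
  have hgetA : ∀ j : Int, 0 ≤ j → j ≤ num →
      PySem.List.pyGetD ((List.range (lst.length + 1)).map (fun k => (lst.take k).sum)) j 0 = F j.toNat := by
    intro j h0 h1
    exact pvTableGet lst j h0 (by omega)
  have hgetB : ∀ j : Int, 0 ≤ j → j ≤ num →
      PySem.List.pyGetD ((List.range (lst'.length + 1)).map (fun k => (lst'.take k).sum)) j 0 = F j.toNat := by
    intro j h0 h1
    rw [pvTableGet lst' j h0 (by omega)]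
    exact pvF_take num lst j.toNat (by omega)
  obtain ⟨hm, hcases, hbound⟩ := pvOuter
    (fun i j => PySem.List.pyGetD ((List.range (lst.length + 1)).map (fun k => (lst.take k).sum)) j 0
      - PySem.List.pyGetD ((List.range (lst.length + 1)).map (fun k => (lst.take k).sum)) i 0 < 0)
    num (PySem.List.pyRange 0 num 1) (-1, 0)
  set sm := (PySem.List.pyRange 0 num 1).foldl (fun s index =>
      (PySem.List.pyRange (index + 1) (num + 1) 1).foldl (fun s jndex =>
        if PySem.List.pyGetD ((List.range (lst.length + 1)).map (fun k => (lst.take k).sum)) jndex 0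
            - PySem.List.pyGetD ((List.range (lst.length + 1)).map (fun k => (lst.take k).sum)) index 0 < 0
            ∧ jndex - index > s.2
        then (index, jndex - index) else s) s) ((-1 : Int), (0 : Int)) with hsm
  set p : Int → Bool := fun L =>
      (PySem.List.pyRange 0 (num - L + 1) 1).any (fun i =>
        decide (PySem.List.pyGetD ((List.range (lst'.length + 1)).map (fun k => (lst'.take k).sum)) (i + L) 0
          - PySem.List.pyGetD ((List.range (lst'.length + 1)).map (fun k => (lst'.take k).sum)) i 0 < 0)) with hp
  have hpchar : ∀ L : Int, 1 ≤ L → L ≤ num →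
      (p L = true ↔ ∃ i : Int, 0 ≤ i ∧ i + L ≤ num ∧ F (i + L).toNat < F i.toNat) := by
    intro L hL1 hL2
    rw [hp]
    simp only [List.any_eq_true, decide_eq_true_eq]
    constructor
    · rintro ⟨i, hi, hneg⟩
      obtain ⟨h0, h1⟩ := PySem.List.mem_pyRange_one.mp hi
      rw [hgetB (i + L) (by omega) (by omega), hgetB i (by omega) (by omega)] at hneg
      exact ⟨i, h0, by omega, by omega⟩
    · rintro ⟨i, h0, h1, hneg⟩
      refine ⟨i, PySem.List.mem_pyRange_one.mpr ⟨by omega, by omega⟩, ?_⟩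
      rw [hgetB (i + L) (by omega) (by omega), hgetB i (by omega) (by omega)]
      omega
  rcases hcases with heq | ⟨i₀, hi₀, j₀, hlt, hle, hc, heq⟩
  · -- the loop never fired: no valid pair, both sides return 0
    rw [heq]
    have hnone : (PySem.List.pyRange num 0 (-1)).find? p = none := by
      apply pvFindNone
      intro L hL1 hL2
      by_contra hcon
      rw [Bool.not_eq_false, hpchar L hL1 hL2] at hcon
      obtain ⟨i, h0, h1, hneg⟩ := hcon
      have := hbound i (PySem.List.mem_pyRange_one.mpr ⟨by omega, by omega⟩) (i + L)
        (by omega) (by omega)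
        (by rw [hgetA (i + L) (by omega) (by omega), hgetA i (by omega) (by omega)]; omega)
      rw [heq] at this
      simp at this; omega
    rw [hnone]
    rw [PySem.List.length_slice]
    simp
  · -- the loop recorded a maximal valid pair (i₀, j₀); both sides return j₀ - i₀
    obtain ⟨hi0l, hi0r⟩ := PySem.List.mem_pyRange_one.mp hi₀
    rw [heq]
    have hw1 : 1 ≤ j₀ - i₀ := by omega
    have hw2 : j₀ - i₀ ≤ num := by omega
    have hsome : (PySem.List.pyRange num 0 (-1)).find? p = some (j₀ - i₀) := by
      apply pvFindSome num (j₀ - i₀) p hw1 hw2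
      · rw [hpchar (j₀ - i₀) hw1 hw2]
        refine ⟨i₀, by omega, by omega, ?_⟩
        have : i₀ + (j₀ - i₀) = j₀ := by omega
        rw [this]
        rw [hgetA j₀ (by omega) (by omega), hgetA i₀ (by omega) (by omega)] at hc
        omega
      · intro L hL1 hL2
        by_contra hcon
        rw [Bool.not_eq_false, hpchar L (by omega) hL2] at hcon
        obtain ⟨i, h0, h1, hneg⟩ := hcon
        have := hbound i (PySem.List.mem_pyRange_one.mpr ⟨by omega, by omega⟩) (i + L)
          (by omega) (by omega)
          (by rw [hgetA (i + L) (by omega) (by omega), hgetA i (by omega) (by omega)]; omega)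
        rw [heq] at this
        simp at this; omega
    rw [hsome]
    rw [PySem.List.length_slice]
    have h1 : (i₀ + (j₀ - i₀)) = ((j₀.toNat : Nat) : Int) := by omega
    have h2 : i₀ = ((i₀.toNat : Nat) : Int) := by omega
    rw [h1]
    rw [h2]
    rw [PySem.List.clampIdx_natCast, PySem.List.clampIdx_natCast]
    simp only []
    omega

-- ===== VERDICT (by name: the statement is the Claim_ definition above) =====
theorem find_max_len_sum_of_negatives_spec : Claim_equal_find_max_len_sum_of_negatives := by
  intro num lst _ hpre
  exact pvMain num lst hpre
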